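-- pv_equiv track=rewrite | github.com/Tomaszsachanowski/SPAM | spam.py | bitmap_transform
-- ===== SOURCE A (Python) =====
-- def bitmap_transform(bitmap):
--     """
--     Przeksztalca bitmape dla kroku S
--
--     @param bitmap: lista bitow
--     """
--     transformed_bitmap = []
--     for partition in bitmap:
--         start_setting_bits = False
--         transformed_partition = []
--         for bit in partition:
--             if start_setting_bits:
--                 transformed_partition.append(1)
--             else:
--                 transformed_partition.append(0)
--             if start_setting_bits is False and bit == 1:
--                 start_setting_bits = True
--         transformed_bitmap.append(transformed_partition)
--     return transformed_bitmap
-- ===== SOURCE B (Python) =====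
-- def bitmap_transform(bitmap):
--     transformed_bitmap = []
--     for partition in bitmap:
--         first = next((i for i, bit in enumerate(partition) if bit == 1), None)
--         if first is None:
--             transformed_bitmap.append([0] * len(partition))
--         else:
--             transformed_bitmap.append([0] * (first + 1) + [1] * (len(partition) - first - 1))
--     return transformed_bitmap
-- ===== Notes on version B (the rewrite author's own statement) =====
-- stated objective: simpler
-- what changed: Replaced the per-bit running-flag loop with a locate-then-construct decomposition: find the first 1 once, then build the result as [0]*(first+1) + [1]*(rest) (or all zeros if no 1).
import Mathlib
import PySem

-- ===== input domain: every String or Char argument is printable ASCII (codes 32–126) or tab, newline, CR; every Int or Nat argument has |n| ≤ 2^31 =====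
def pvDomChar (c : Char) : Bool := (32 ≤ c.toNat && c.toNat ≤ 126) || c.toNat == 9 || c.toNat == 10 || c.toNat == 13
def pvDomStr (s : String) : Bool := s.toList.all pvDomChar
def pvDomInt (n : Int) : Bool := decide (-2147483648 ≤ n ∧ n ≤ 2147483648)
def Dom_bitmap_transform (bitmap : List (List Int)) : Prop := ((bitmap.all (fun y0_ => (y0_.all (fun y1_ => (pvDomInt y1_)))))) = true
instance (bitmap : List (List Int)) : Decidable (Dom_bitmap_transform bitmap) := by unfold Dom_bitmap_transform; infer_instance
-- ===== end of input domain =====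

-- B replaces A's per-bit running-flag loop by a locate-then-construct decomposition (find first 1, then build by replication); objective: simpler.


-- ===== PORT A =====
-- one step of A's inner loop: state = (start_setting_bits, transformed_partition)
def bitmapStepA (st : Bool × List Int) (bit : Int) : Bool × List Int :=
  let tp := st.2 ++ [if st.1 then (1 : Int) else 0]
  (if st.1 = false ∧ bit = 1 then true else st.1, tp)

def bitmap_transform (bitmap : List (List Int)) : List (List Int) :=
  bitmap.map (fun partition => (partition.foldl bitmapStepA (false, [])).2)

-- ===== PORT B =====
def bitmap_transform_alt (bitmap : List (List Int)) : List (List Int) :=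
  bitmap.map (fun partition =>
    match partition.findIdx? (fun bit => bit == 1) with
    | none => List.replicate partition.length 0
    | some i => List.replicate (i + 1) 0 ++ List.replicate (partition.length - i - 1) 1)

-- ===== PRECONDITION & SPEC =====
def Spec_bitmap_transform (bitmap : List (List Int)) (out : List (List Int)) : Prop := out = bitmap_transform_alt bitmap
instance (bitmap : List (List Int)) (out : List (List Int)) : Decidable (Spec_bitmap_transform bitmap out) := by unfold Spec_bitmap_transform; infer_instance

-- ===== CLAIM (what is proved, stated in full; the proofs are below) =====
def Claim_equal_bitmap_transform : Prop := ∀ (bitmap : List (List Int)), Dom_bitmap_transform bitmap → Spec_bitmap_transform bitmap (bitmap_transform bitmap)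

-- ===== LEMMAS AND PROOFS =====
theorem bitmapStepA_true (l : List Int) (acc : List Int) :
    l.foldl bitmapStepA (true, acc) = (true, acc ++ List.replicate l.length 1) := by
  induction l generalizing acc with
  | nil => simp
  | cons b t ih =>
    simp [List.foldl, bitmapStepA, ih, List.replicate_succ, List.append_assoc]

theorem bitmapStepA_false (l : List Int) (acc : List Int) :
    (l.foldl bitmapStepA (false, acc)).2 =
      match l.findIdx? (fun bit => bit == 1) with
      | none => acc ++ List.replicate l.length 0
      | some i => acc ++ (List.replicate (i + 1) 0 ++ List.replicate (l.length - i - 1) 1) := by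
  induction l generalizing acc with
  | nil => simp
  | cons b t ih =>
    by_cases hb : b = 1
    · subst hb
      simp [List.foldl, bitmapStepA, bitmapStepA_true, List.findIdx?_cons,
        List.replicate_succ, List.append_assoc]
    · rw [List.foldl_cons]
      have hstep : bitmapStepA (false, acc) b = (false, acc ++ [0]) := by
        simp [bitmapStepA, hb]
      rw [hstep, ih]
      cases h : t.findIdx? (fun bit => bit == 1) with
      | none =>
        simp [List.findIdx?_cons, hb, h, List.replicate_succ]
      | some i =>
        simp [List.findIdx?_cons, hb, h, List.replicate_succ, Nat.succ_sub_succ]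

-- ===== VERDICT (by name: the statement is the Claim_ definition above) =====
theorem bitmap_transform_spec : Claim_equal_bitmap_transform := by
  intro bitmap _
  unfold Spec_bitmap_transform bitmap_transform bitmap_transform_alt
  refine List.map_congr_left (fun p _ => ?_)
  simpa using bitmapStepA_false p []
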